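-- pv_equiv track=rewrite | github.com/IDeA-ANL-ORNL/StructBioReasoner | struct_bio_reasoner/agents/molecular_dynamics/free_energy_agent.py | format_for_cpptraj
-- ===== SOURCE A (Python) =====
-- def format_for_cpptraj(
--                        resids: list[int]) -> str:
--     """"""
--     string = ':'
--     cur = resids[0] - 1
--     start = resids[0]
--     end = None
--     for resid in resids:
--         if resid - cur > 1:
--             end = cur
--             string += f'{start}-{end},'
--             start = resid
--
--         cur = resid
--
--     end = resids[-1]
--     string += f'{start}-{end}'
--
--     return string
-- ===== SOURCE B (Python) =====
-- def format_for_cpptraj(resids: list[int]) -> str: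
--     # Phase 1: compute the cut positions — indices i where the gap to the
--     # previous residue exceeds 1 — by a pairwise zip of the list with itself.
--     n = len(resids)
--     cuts = [i for i, (p, q) in enumerate(zip(resids, resids[1:]), 1) if q - p > 1]
--     # Phase 2: the run boundaries are [0, *cuts, n]; each consecutive boundary
--     # pair (a, b) delimits a run resids[a:b], rendered from its end elements.
--     bounds = [0] + cuts + [n]
--     return ':' + ','.join(f'{resids[a]}-{resids[b - 1]}'
--                           for a, b in zip(bounds, bounds[1:]))
-- ===== Notes on version B (the rewrite author's own statement) =====
-- stated objective: alternative
-- what changed: B replaces A's stateful single pass (cur/start/string accumulator) by an index-based two-phase computation: it first derives the list of cut positions from a pairwise zip of the list with its tail, forms the boundary list [0,*cuts,n], and then renders each run by indexing the original list at consecutive boundary pairs.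
import Mathlib
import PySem

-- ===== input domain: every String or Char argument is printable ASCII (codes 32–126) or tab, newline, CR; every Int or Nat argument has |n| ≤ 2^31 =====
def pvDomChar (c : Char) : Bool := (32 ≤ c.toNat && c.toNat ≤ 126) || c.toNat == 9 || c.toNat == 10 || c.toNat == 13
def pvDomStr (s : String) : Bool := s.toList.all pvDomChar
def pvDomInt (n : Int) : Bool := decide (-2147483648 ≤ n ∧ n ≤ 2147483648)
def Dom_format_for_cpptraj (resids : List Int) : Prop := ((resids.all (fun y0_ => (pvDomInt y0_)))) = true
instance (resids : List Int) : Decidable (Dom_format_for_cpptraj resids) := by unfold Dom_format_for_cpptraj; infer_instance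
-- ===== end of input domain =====

-- B replaces A's stateful single pass by a two-phase index computation: cut positions from a
-- pairwise zip, then runs rendered by indexing at consecutive boundaries (return value only).

-- ===== PORT A =====
-- state = (string, cur, start); the [] branch is unreachable under Pre_ (Python raises IndexError there)
def format_for_cpptraj (resids : List Int) : String :=
  match resids with
  | [] => ""
  | r0 :: _ =>
    let st := resids.foldl
      (fun (st : String × Int × Int) resid =>
        if resid - st.2.1 > 1 then
          (st.1 ++ PySem.Int.toStr st.2.2 ++ "-" ++ PySem.Int.toStr st.2.1 ++ ",", resid, resid)
        else (st.1, resid, st.2.2))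
      (":", r0 - 1, r0)
    st.1 ++ PySem.Int.toStr st.2.2 ++ "-" ++ PySem.Int.toStr (resids.getLastD 0)

-- ===== PORT B =====
-- resids[1:] = resids.tail; enumerate(zip(..), 1) = PySem.List.enumerate (zip ..) 1.
-- All indices a, b-1 are nonnegative and in range under Pre_ (cuts ≥ 1, 0 ≤ a < n, 1 ≤ b ≤ n),
-- so resids[a] / resids[b-1] are ported with getD ·.toNat (exact there).
def format_for_cpptraj_alt (resids : List Int) : String :=
  let n : Int := resids.length
  let cuts : List Int := (PySem.List.enumerate (resids.zip resids.tail) 1).filterMap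
      (fun p => if p.2.2 - p.2.1 > 1 then some p.1 else none)
  let bounds : List Int := 0 :: cuts ++ [n]
  let parts : List String := (bounds.zip bounds.tail).map
      (fun ab => PySem.Int.toStr (resids.getD ab.1.toNat 0) ++ "-" ++
                 PySem.Int.toStr (resids.getD (ab.2 - 1).toNat 0))
  ":" ++ PySem.Str.join "," parts

-- ===== PRECONDITION & SPEC =====
-- Pre_ excludes only the empty list, on which Python A raises IndexError (resids[0]).
def Pre_format_for_cpptraj (resids : List Int) : Prop := resids ≠ []
instance (resids : List Int) : Decidable (Pre_format_for_cpptraj resids) := by unfold Pre_format_for_cpptraj; infer_instance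
def pvWitness_format_for_cpptraj : List Int := ([3, 4, 7])

def Spec_format_for_cpptraj (resids : List Int) (out : String) : Prop := out = format_for_cpptraj_alt resids
instance (resids : List Int) (out : String) : Decidable (Spec_format_for_cpptraj resids out) := by unfold Spec_format_for_cpptraj; infer_instance

-- ===== CLAIM (what is proved, stated in full; the proofs are below) =====
def Claim_equal_format_for_cpptraj : Prop := ∀ (resids : List Int), Dom_format_for_cpptraj resids → Pre_format_for_cpptraj resids → Spec_format_for_cpptraj resids (format_for_cpptraj resids)

-- ===== LEMMAS AND PROOFS =====

-- rendering of one run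
def pvFmt (p : Int × Int) : String := PySem.Int.toStr p.1 ++ "-" ++ PySem.Int.toStr p.2

-- comma join, proof-side shape
def pvJn : List String → String
  | [] => ""
  | [x] => x
  | x :: y :: t => x ++ "," ++ pvJn (y :: t)

-- the common specification: the list of (first, last) runs
def pvRuns : Int → Int → List Int → List (Int × Int)
  | start, cur, [] => [(start, cur)]
  | start, cur, r :: t => if r - cur > 1 then (start, cur) :: pvRuns r r t else pvRuns start r t

-- B's phase-1 data, as proof-side functions
def pvCutsF (xs : List Int) : List Int :=
  (PySem.List.enumerate (xs.zip xs.tail) 1).filterMap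
    (fun p => if p.2.2 - p.2.1 > 1 then some p.1 else none)
def pvBounds (xs : List Int) : List Int := 0 :: pvCutsF xs ++ [(xs.length : Int)]
def pvPair (xs : List Int) (ab : Int × Int) : Int × Int :=
  (xs.getD ab.1.toNat 0, xs.getD (ab.2 - 1).toNat 0)
def pvPartsP (xs : List Int) : List (Int × Int) :=
  ((pvBounds xs).zip (pvBounds xs).tail).map (pvPair xs)

theorem pvRuns_ne_nil : ∀ (l : List Int) (s c : Int), pvRuns s c l ≠ [] := by
  intro l
  induction l with
  | nil => intro s c; simp [pvRuns]
  | cons r t ih =>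
    intro s c
    by_cases h : r - c > 1
    · simp [pvRuns, h]
    · simpa [pvRuns, h] using ih s r

theorem pvRuns_shift : ∀ (l : List Int) (c s s' : Int),
    ∃ e tl, pvRuns s c l = (s, e) :: tl ∧ pvRuns s' c l = (s', e) :: tl := by
  intro l
  induction l with
  | nil => intro c s s'; exact ⟨c, [], rfl, rfl⟩
  | cons r t ih =>
    intro c s s'
    by_cases h : r - c > 1
    · exact ⟨c, pvRuns r r t, by simp [pvRuns, h], by simp [pvRuns, h]⟩
    · obtain ⟨e, tl, h1, h2⟩ := ih r s s'
      exact ⟨e, tl, by simp [pvRuns, h, h1], by simp [pvRuns, h, h2]⟩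

theorem pvEnumShift {α : Type} : ∀ (xs : List α) (s : Int),
    PySem.List.enumerate xs (s + 1) = (PySem.List.enumerate xs s).map (fun p => (p.1 + 1, p.2)) := by
  intro xs
  induction xs with
  | nil => intro s; simp [PySem.List.enumerate_nil]
  | cons x t ih =>
    intro s
    rw [PySem.List.enumerate_cons, PySem.List.enumerate_cons, List.map_cons, ih (s + 1)]

theorem pvCuts_cons (x y : Int) (t : List Int) :
    pvCutsF (x :: y :: t) = (if y - x > 1 then [(1 : Int)] else []) ++ (pvCutsF (y :: t)).map (· + 1) := by
  unfold pvCutsF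
  have hz : (x :: y :: t).zip (x :: y :: t).tail = (x, y) :: (y :: t).zip (y :: t).tail := by
    simp [List.zip]
  rw [hz, PySem.List.enumerate_cons, show (1 : Int) + 1 = 1 + 1 from rfl, pvEnumShift,
      List.filterMap_cons]
  rw [List.filterMap_map, List.map_filterMap]
  have hfun : ((fun (p : Int × Int × Int) => if p.2.2 - p.2.1 > 1 then some p.1 else none) ∘
        (fun (p : Int × Int × Int) => (p.1 + 1, p.2))) =
      (fun (p : Int × Int × Int) =>
        Option.map (· + 1) (if p.2.2 - p.2.1 > 1 then some p.1 else none)) := by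
    funext p
    by_cases hp : p.2.2 - p.2.1 > 1 <;> simp [Function.comp, hp]
  rw [hfun]
  by_cases h : y - x > 1 <;> simp [h]

theorem pvCuts_pos : ∀ (xs : List Int), ∀ i ∈ pvCutsF xs, 1 ≤ i := by
  intro xs i hi
  unfold pvCutsF at hi
  obtain ⟨p, hp, hf⟩ := List.mem_filterMap.mp hi
  rw [PySem.List.mem_enumerate_iff] at hp
  obtain ⟨k, hk, rfl⟩ := hp
  split at hf
  · simp only [Option.some.injEq] at hf
    omega
  · exact absurd hf (by simp)

theorem pvTail_pos (y : Int) (t : List Int) :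
    ∀ b ∈ pvCutsF (y :: t) ++ [(((y :: t).length : Nat) : Int)], 1 ≤ b := by
  intro b hb
  rcases List.mem_append.mp hb with hc | hc
  · exact pvCuts_pos _ b hc
  · simp only [List.mem_singleton] at hc
    subst hc
    simp

theorem pvPair_shift (x : Int) (ys : List Int) (a b : Int) (ha : 0 ≤ a) (hb : 1 ≤ b) :
    pvPair (x :: ys) (a + 1, b + 1) = pvPair ys (a, b) := by
  simp only [pvPair]
  have ha' : (a + 1).toNat = a.toNat + 1 := by omega
  have hb' : (b + 1 - 1).toNat = (b - 1).toNat + 1 := by omega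
  rw [ha', hb']
  rfl

theorem pvZipShift (bt : List Int) (b0 : Int) :
    ((0 : Int) :: ((b0 :: bt).map (· + 1))).zip ((b0 :: bt).map (· + 1))
    = (0, b0 + 1) :: ((b0 :: bt).zip bt).map (Prod.map (· + 1) (· + 1)) := by
  simp only [List.map_cons, List.zip_cons_cons]
  rw [show ((b0 + 1) :: bt.map (· + 1)) = (b0 :: bt).map (· + 1) from rfl, List.zip_map]

-- main lemma for B: the boundary-indexing parts are exactly the runs
theorem pvParts_eq_runs : ∀ (rest : List Int) (x : Int), pvPartsP (x :: rest) = pvRuns x x rest := by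
  intro rest
  induction rest with
  | nil =>
    intro x
    simp [pvPartsP, pvBounds, pvCutsF, pvPair, pvRuns, PySem.List.enumerate_nil]
  | cons y t ih =>
    intro x
    have hL : (((x :: y :: t).length : Nat) : Int) = (((y :: t).length : Nat) : Int) + 1 := by
      simp
    have hBd : pvBounds (y :: t) = 0 :: (pvCutsF (y :: t) ++ [(((y :: t).length : Nat) : Int)]) := rfl
    by_cases h : y - x > 1
    · -- bounds of the longer list are 0 followed by the shifted bounds of the shorter one
      have hb : pvBounds (x :: y :: t) = 0 :: (pvBounds (y :: t)).map (· + 1) := by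
        simp only [pvBounds, pvCuts_cons, h, if_pos, hL, List.map_cons, List.map_append,
          List.cons_append]
        simp
      have hz : (pvBounds (x :: y :: t)).zip (pvBounds (x :: y :: t)).tail
          = ((0 : Int), (0 : Int) + 1) ::
            ((pvBounds (y :: t)).zip (pvBounds (y :: t)).tail).map (Prod.map (· + 1) (· + 1)) := by
        rw [hb, hBd, List.tail_cons, pvZipShift, List.tail_cons]
      have hcongr : ∀ ab ∈ (pvBounds (y :: t)).zip (pvBounds (y :: t)).tail,
          pvPair (x :: y :: t) (Prod.map (· + 1) (· + 1) ab) = pvPair (y :: t) ab := by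
        intro ab hab
        obtain ⟨a, b⟩ := ab
        obtain ⟨h1, h2⟩ := List.of_mem_zip hab
        rw [hBd] at h1 h2
        simp only [List.tail_cons] at h2
        have hb2 : 1 ≤ b := pvTail_pos y t b h2
        have ha1 : 0 ≤ a := by
          rcases List.mem_cons.mp h1 with h0 | h0
          · omega
          · have := pvTail_pos y t a h0; omega
        exact pvPair_shift x (y :: t) a b ha1 hb2
      calc pvPartsP (x :: y :: t)
          = pvPair (x :: y :: t) (0, 0 + 1) ::
            ((pvBounds (y :: t)).zip (pvBounds (y :: t)).tail).map
              (fun ab => pvPair (x :: y :: t) (Prod.map (· + 1) (· + 1) ab)) := by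
            simp only [pvPartsP, hz, List.map_cons, List.map_map]
            rfl
        _ = (x, x) :: pvPartsP (y :: t) := by
            rw [List.map_congr_left hcongr]
            rfl
        _ = pvRuns x x (y :: t) := by
            rw [ih y]
            simp [pvRuns, h]
    · -- no cut after x: the first run of the shorter list is extended backwards to start at x
      obtain ⟨c, r2, hcr⟩ : ∃ c r2,
          pvCutsF (y :: t) ++ [(((y :: t).length : Nat) : Int)] = c :: r2 := by
        cases hC : pvCutsF (y :: t) <;> exact ⟨_, _, rfl⟩
      have hcpos : ∀ b ∈ c :: r2, 1 ≤ b := by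
        intro b hbm
        exact pvTail_pos y t b (hcr ▸ hbm)
      have hb : pvBounds (x :: y :: t) = 0 :: (c :: r2).map (· + 1) := by
        simp only [pvBounds, pvCuts_cons, h, hL, ← hcr,
          List.map_append, List.map_singleton]
        simp
      have hz : (pvBounds (x :: y :: t)).zip (pvBounds (x :: y :: t)).tail
          = ((0 : Int), c + 1) :: ((c :: r2).zip r2).map (Prod.map (· + 1) (· + 1)) := by
        rw [hb, List.tail_cons, pvZipShift]
      have hz' : (pvBounds (y :: t)).zip (pvBounds (y :: t)).tail
          = ((0 : Int), c) :: (c :: r2).zip r2 := by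
        rw [hBd, hcr]
        rfl
      obtain ⟨e, tl, h1, h2⟩ := pvRuns_shift t y x y
      have hih : pvPair (y :: t) (0, c) :: ((c :: r2).zip r2).map (pvPair (y :: t))
          = (y, e) :: tl := by
        have := ih y
        rw [pvPartsP, hz', List.map_cons, h2] at this
        exact this
      have hhead : pvPair (y :: t) (0, c) = (y, e) := (List.cons.injEq _ _ _ _ ▸ hih).1
      have htl : ((c :: r2).zip r2).map (pvPair (y :: t)) = tl := (List.cons.injEq _ _ _ _ ▸ hih).2
      have hcongr : ∀ ab ∈ (c :: r2).zip r2,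
          pvPair (x :: y :: t) (Prod.map (· + 1) (· + 1) ab) = pvPair (y :: t) ab := by
        intro ab hab
        obtain ⟨a, b⟩ := ab
        obtain ⟨h1m, h2m⟩ := List.of_mem_zip hab
        have hb2 : 1 ≤ b := hcpos b (List.mem_cons_of_mem _ h2m)
        have ha1 : 0 ≤ a := by have := hcpos a h1m; omega
        exact pvPair_shift x (y :: t) a b ha1 hb2
      have hc1 : 1 ≤ c := hcpos c (by simp)
      have hheadx : pvPair (x :: y :: t) (0, c + 1) = (x, e) := by
        have he : (y :: t).getD (c - 1).toNat 0 = e := congrArg Prod.snd hhead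
        simp only [pvPair] at he ⊢
        have hc' : (c + 1 - 1).toNat = (c - 1).toNat + 1 := by omega
        rw [hc']
        simp only [Int.toNat_zero, List.getD_cons_zero, List.getD_cons_succ]
        rw [he]
      calc pvPartsP (x :: y :: t)
          = pvPair (x :: y :: t) (0, c + 1) ::
            ((c :: r2).zip r2).map (fun ab => pvPair (x :: y :: t) (Prod.map (· + 1) (· + 1) ab)) := by
            simp only [pvPartsP, hz, List.map_cons, List.map_map]
            rfl
        _ = (x, e) :: tl := by
            rw [hheadx, List.map_congr_left hcongr, htl]
        _ = pvRuns x x (y :: t) := by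
            rw [show pvRuns x x (y :: t) = pvRuns x y t by simp [pvRuns, h], h1]

theorem pvJn_cons (x : String) (l : List String) (hl : l ≠ []) :
    pvJn (x :: l) = x ++ "," ++ pvJn l := by
  cases l with
  | nil => exact absurd rfl hl
  | cons y t => rfl

-- A's loop, generalized: fold from (pre, cur, start) + epilogue = pre ++ joined runs
theorem pvA : ∀ (rest : List Int) (pre : String) (start cur : Int),
    (let st := rest.foldl
      (fun (st : String × Int × Int) resid =>
        if resid - st.2.1 > 1 then
          (st.1 ++ PySem.Int.toStr st.2.2 ++ "-" ++ PySem.Int.toStr st.2.1 ++ ",", resid, resid)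
        else (st.1, resid, st.2.2))
      (pre, cur, start)
     st.1 ++ PySem.Int.toStr st.2.2 ++ "-" ++ PySem.Int.toStr (rest.getLastD cur)) =
    pre ++ pvJn ((pvRuns start cur rest).map pvFmt) := by
  intro rest
  induction rest with
  | nil =>
    intro pre start cur
    simp [pvRuns, pvJn, pvFmt, String.append_assoc]
  | cons r t ih =>
    intro pre start cur
    simp only [List.foldl_cons, List.getLastD_cons]
    by_cases h : r - cur > 1
    · simp only [if_pos h]
      rw [ih]
      have hne : ((pvRuns r r t).map pvFmt) ≠ [] := by
        simp [pvRuns_ne_nil]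
      rw [show pvRuns start cur (r :: t) = (start, cur) :: pvRuns r r t by simp [pvRuns, h],
          List.map_cons, pvJn_cons _ _ hne]
      simp [pvFmt, String.append_assoc]
    · simp only [if_neg h]
      rw [ih]
      simp [pvRuns, h]

theorem pvJoin_cons (x : String) (t : List String) (ht : t ≠ []) :
    PySem.Str.join "," (x :: t) = x ++ "," ++ PySem.Str.join "," t := by
  cases t with
  | nil => exact absurd rfl ht
  | cons y t =>
    simp [PySem.Str.join, PySem.Chars.join_cons_cons, String.append_assoc]
    rw [show (',' :: PySem.Chars.join [','] (y.toList :: List.map String.toList t))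
          = [','] ++ PySem.Chars.join [','] (y.toList :: List.map String.toList t) from rfl,
        String.ofList_append]

theorem pvJn_eq_join : ∀ (l : List String), l ≠ [] → PySem.Str.join "," l = pvJn l := by
  intro l
  induction l with
  | nil => intro h; exact absurd rfl h
  | cons x t ih =>
    intro _
    cases t with
    | nil => simp [PySem.Str.join, PySem.Chars.join, List.intercalate, pvJn]
    | cons y s =>
      rw [pvJoin_cons x (y :: s) (by simp), ih (by simp), pvJn_cons x (y :: s) (by simp)]

-- ===== VERDICT (by name: the statement is the Claim_ definition above) =====
theorem format_for_cpptraj_spec : Claim_equal_format_for_cpptraj := by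
  intro resids _ hpre
  unfold Spec_format_for_cpptraj
  cases resids with
  | nil => exact absurd rfl hpre
  | cons r0 rest =>
    have hA : format_for_cpptraj (r0 :: rest) =
        ":" ++ pvJn ((pvRuns r0 r0 rest).map pvFmt) := by
      simp only [format_for_cpptraj, List.foldl_cons, List.getLastD_cons]
      rw [if_neg (by omega : ¬ (r0 - (r0 - 1) > 1))]
      exact pvA rest ":" r0 r0
    have hB : format_for_cpptraj_alt (r0 :: rest) =
        ":" ++ PySem.Str.join "," ((pvPartsP (r0 :: rest)).map pvFmt) := by
      simp only [format_for_cpptraj_alt, pvPartsP, pvBounds, pvCutsF, List.map_map]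
      rfl
    rw [hA, hB, pvParts_eq_runs rest r0,
        pvJn_eq_join _ (by simp [pvRuns_ne_nil])]
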